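-- pv_equiv track=rewrite | github.com/basusaptarshi89/data_structure_with_python | leetcode/search_natural_wells.py | search_natural_well_from_position
-- ===== SOURCE A (Python) =====
-- def search_natural_well_from_position(start_pos, A):
-- 	"""Returns a tuple of two index positions bordering a natural well with left bound as start_pos
-- 	   E.g.
-- 	   A = [0, 1, 0, 2, 1, 1, 0, 4, 4, 2, 0]
--
-- 	   search_natural_well_from_position(0, A) --> (1, 3)
-- 	   search_natural_well_from_position(3, A) --> (3, 7)
--
-- 	   If no natural_well is found, it returns (start_pos, None), E.g.
-- 	   search_natural_well_from_position(7, A) --> (7, None)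
-- 	"""
--
-- 	natural_well_end = None
--
-- 	went_down = False
-- 	went_up = False
--
-- 	high = start_pos + 1
-- 	while high < len(A):
-- 		if A[high] < A[start_pos]:
-- 			if not went_down:
-- 				went_down = True
-- 		elif went_down and (A[high] >= A[start_pos]):
-- 			went_up = True
--
-- 		if went_down and went_up:
-- 			natural_well_end = high
-- 			break
-- 		else:
-- 			high += 1
-- 	return (start_pos, natural_well_end)
-- ===== SOURCE B (Python) =====
-- def search_natural_well_from_position(start_pos, A):
--     if start_pos + 1 >= len(A):
--         return (start_pos, None)
--     v0 = A[start_pos]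
--     # boolean mask over the scanned indices: is the element below the start height?
--     below = [A[h] < v0 for h in range(start_pos + 1, len(A))]
--     if True not in below:
--         return (start_pos, None)          # never enters a well
--     d = below.index(True)                 # position of the first dip
--     rest = below[d:]
--     if False not in rest:
--         return (start_pos, None)          # never climbs back out
--     return (start_pos, start_pos + 1 + d + rest.index(False))
-- ===== Notes on version B (the rewrite author's own statement) =====
-- stated objective: alternative
-- what changed: Replaces A's flag-driven scanning loop (went_down/went_up state machine) by a data-structure formulation: build once the boolean mask [A[h] < A[start_pos]] over the tail, then the well boundary is obtained purely by library searches - index of the first True (the dip) and index of the first False after it - with no hand-written scan or state at all.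
import Mathlib
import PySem

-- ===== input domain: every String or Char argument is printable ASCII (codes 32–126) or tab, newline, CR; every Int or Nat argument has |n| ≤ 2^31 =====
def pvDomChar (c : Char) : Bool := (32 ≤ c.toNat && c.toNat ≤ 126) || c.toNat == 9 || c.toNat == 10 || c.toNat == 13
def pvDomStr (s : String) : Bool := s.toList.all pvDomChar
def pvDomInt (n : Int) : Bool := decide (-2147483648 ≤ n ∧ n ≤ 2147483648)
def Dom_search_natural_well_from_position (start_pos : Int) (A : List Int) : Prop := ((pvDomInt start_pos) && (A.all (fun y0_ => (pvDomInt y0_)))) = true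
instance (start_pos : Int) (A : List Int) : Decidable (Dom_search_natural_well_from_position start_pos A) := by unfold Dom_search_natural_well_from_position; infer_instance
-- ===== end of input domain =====

-- B replaces A's flag-driven scanning loop by a boolean mask over the scanned indices
-- plus two library index searches (first True = dip, first False after it = boundary);
-- objective: alternative. Proven equal on Pre_ (where Python A returns normally).


-- ===== PORT A =====
-- A's while loop; fuel = number of remaining indices below len(A) (exact: the loop runs
-- while high < len(A), so it makes at most (len(A) - initial high) iterations);
-- v0 is A[start_pos] (pyGetD 0 is exact inside Pre_, where every accessed index is valid)
def searchA_loop (A : List Int) (v0 : Int) : Nat → Bool → Bool → Int → Option Int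
  | 0, _, _, _ => none
  | fuel + 1, went_down, went_up, high =>
    if high < (A.length : Int) then
      let v := PySem.List.pyGetD A high 0
      let wd := if v < v0 then (if went_down = false then true else went_down) else went_down
      let wu := if ¬ (v < v0) ∧ went_down = true then true else went_up
      if wd = true ∧ wu = true then some high
      else searchA_loop A v0 fuel wd wu (high + 1)
    else none

def search_natural_well_from_position (start_pos : Int) (A : List Int) : Int × Option Int :=
  (start_pos,
   searchA_loop A (PySem.List.pyGetD A start_pos 0)
     ((A.length : Int) - (start_pos + 1)).toNat false false (start_pos + 1))

-- ===== PORT B =====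
def search_natural_well_from_position_alt (start_pos : Int) (A : List Int) : Int × Option Int :=
  if (A.length : Int) ≤ start_pos + 1 then (start_pos, none)
  else
    let v0 := PySem.List.pyGetD A start_pos 0
    let below := (PySem.List.pyRange (start_pos + 1) (A.length : Int) 1).map
      (fun h => decide (PySem.List.pyGetD A h 0 < v0))
    match PySem.List.index? below true with
    | none => (start_pos, none)                 -- 'if True not in below'
    | some d =>
      let rest := PySem.List.slice below (some (d : Int)) none
      match PySem.List.index? rest false with
      | none => (start_pos, none)               -- 'if False not in rest'
      | some k => (start_pos, some (start_pos + 1 + d + k))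

-- ===== PRECONDITION & SPEC =====
-- Pre_ excludes exactly the inputs where Python A raises IndexError: the loop body runs
-- (start_pos + 1 < len(A)) but A[start_pos] is an invalid index.
def Pre_search_natural_well_from_position (start_pos : Int) (A : List Int) : Prop :=
  start_pos + 1 < (A.length : Int) → -(A.length : Int) ≤ start_pos
instance (start_pos : Int) (A : List Int) : Decidable (Pre_search_natural_well_from_position start_pos A) := by unfold Pre_search_natural_well_from_position; infer_instance
def pvWitness_search_natural_well_from_position : Int × List Int := (3, [0, 1, 0, 2, 1, 1, 0, 4, 4, 2, 0])
def Spec_search_natural_well_from_position (start_pos : Int) (A : List Int) (out : Int × Option Int) : Prop := out = search_natural_well_from_position_alt start_pos A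
instance (start_pos : Int) (A : List Int) (out : Int × Option Int) : Decidable (Spec_search_natural_well_from_position start_pos A out) := by unfold Spec_search_natural_well_from_position; infer_instance

-- ===== CLAIM (what is proved, stated in full; the proofs are below) =====
def Claim_equal_search_natural_well_from_position : Prop := ∀ (start_pos : Int) (A : List Int), Dom_search_natural_well_from_position start_pos A → Pre_search_natural_well_from_position start_pos A → Spec_search_natural_well_from_position start_pos A (search_natural_well_from_position start_pos A)

-- ===== LEMMAS AND PROOFS =====

-- the boolean mask over the indices scanned from h on
def wellMask (A : List Int) (v0 h : Int) : List Bool :=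
  (PySem.List.pyRange h (A.length : Int) 1).map (fun x => decide (PySem.List.pyGetD A x 0 < v0))

lemma wellMask_nil (A : List Int) (v0 h : Int) (hh : (A.length : Int) ≤ h) :
    wellMask A v0 h = [] := by
  unfold wellMask
  rw [PySem.List.pyRange_one_eq_nil hh]
  rfl

lemma wellMask_cons (A : List Int) (v0 h : Int) (hh : h < (A.length : Int)) :
    wellMask A v0 h = decide (PySem.List.pyGetD A h 0 < v0) :: wellMask A v0 (h + 1) := by
  unfold wellMask
  rw [PySem.List.pyRange_one_cons hh]
  rfl

-- one-step unfoldings of A's loop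
lemma stepA_out (A : List Int) (v0 : Int) (f : Nat) (wd wu : Bool) (h : Int)
    (hh : ¬ h < (A.length : Int)) : searchA_loop A v0 f wd wu h = none := by
  cases f <;> simp [searchA_loop, hh]

lemma stepA_true_down (A : List Int) (v0 : Int) (m : Nat) (h : Int)
    (hh : h < (A.length : Int)) (hv : PySem.List.pyGetD A h 0 < v0) :
    searchA_loop A v0 (m + 1) true false h = searchA_loop A v0 m true false (h + 1) := by
  rw [searchA_loop]; simp [hh, hv]

lemma stepA_true_up (A : List Int) (v0 : Int) (m : Nat) (h : Int)
    (hh : h < (A.length : Int)) (hv : ¬ PySem.List.pyGetD A h 0 < v0) :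
    searchA_loop A v0 (m + 1) true false h = some h := by
  rw [searchA_loop]; simp [hh, hv]

lemma stepA_false_down (A : List Int) (v0 : Int) (m : Nat) (h : Int)
    (hh : h < (A.length : Int)) (hv : PySem.List.pyGetD A h 0 < v0) :
    searchA_loop A v0 (m + 1) false false h = searchA_loop A v0 m true false (h + 1) := by
  rw [searchA_loop]; simp [hh, hv]

lemma stepA_false_flat (A : List Int) (v0 : Int) (m : Nat) (h : Int)
    (hh : h < (A.length : Int)) (hv : ¬ PySem.List.pyGetD A h 0 < v0) :
    searchA_loop A v0 (m + 1) false false h = searchA_loop A v0 m false false (h + 1) := by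
  rw [searchA_loop]; simp [hh, hv]

-- A's loop after the dip (went_down = true) finds the first False of the mask
lemma loop_true_eq (A : List Int) (v0 : Int) :
    ∀ (f : Nat) (h : Int), ((A.length : Int) - h).toNat ≤ f →
      searchA_loop A v0 f true false h =
        (PySem.List.index? (wellMask A v0 h) false).map (fun k => h + (k : Int)) := by
  intro f
  induction f with
  | zero =>
    intro h hf
    rw [stepA_out A v0 0 true false h (by omega), wellMask_nil A v0 h (by omega)]
    simp [PySem.List.index?]
  | succ m ih =>
    intro h hf
    by_cases hh : h < (A.length : Int)
    · rw [wellMask_cons A v0 h hh]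
      by_cases hv : PySem.List.pyGetD A h 0 < v0
      · rw [stepA_true_down A v0 m h hh hv, ih (h + 1) (by omega),
            show decide (PySem.List.pyGetD A h 0 < v0) = true by simp [hv],
            PySem.List.index?_cons_of_ne _ (show (true : Bool) ≠ false by simp)]
        cases PySem.List.index? (wellMask A v0 (h + 1)) false <;> (simp; try omega)
      · rw [stepA_true_up A v0 m h hh hv,
            show decide (PySem.List.pyGetD A h 0 < v0) = false by simp [hv],
            PySem.List.index?_cons_self]
        simp
    · rw [stepA_out A v0 (m + 1) true false h hh, wellMask_nil A v0 h (by omega)]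
      simp [PySem.List.index?]

-- A's loop before the dip equals: first True of the mask, then first False from there on
lemma loop_false_eq (A : List Int) (v0 : Int) :
    ∀ (f : Nat) (h : Int), ((A.length : Int) - h).toNat ≤ f →
      searchA_loop A v0 f false false h =
        (match PySem.List.index? (wellMask A v0 h) true with
         | none => none
         | some d =>
           match PySem.List.index? ((wellMask A v0 h).drop d) false with
           | none => none
           | some k => some (h + (d : Int) + (k : Int))) := by
  intro f
  induction f with
  | zero =>
    intro h hf
    rw [stepA_out A v0 0 false false h (by omega), wellMask_nil A v0 h (by omega)]
    simp [PySem.List.index?]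
  | succ m ih =>
    intro h hf
    by_cases hh : h < (A.length : Int)
    · rw [wellMask_cons A v0 h hh]
      by_cases hv : PySem.List.pyGetD A h 0 < v0
      · -- dip here: went_down becomes true, keep searching for the climb-out
        rw [stepA_false_down A v0 m h hh hv, loop_true_eq A v0 m (h + 1) (by omega),
            show decide (PySem.List.pyGetD A h 0 < v0) = true by simp [hv],
            PySem.List.index?_cons_self]
        dsimp only
        rw [List.drop_zero, PySem.List.index?_cons_of_ne _ (show (true : Bool) ≠ false by simp)]
        cases PySem.List.index? (wellMask A v0 (h + 1)) false <;> (simp; try omega)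
      · -- still on the rim: both sides skip this position
        rw [stepA_false_flat A v0 m h hh hv, ih (h + 1) (by omega),
            show decide (PySem.List.pyGetD A h 0 < v0) = false by simp [hv],
            PySem.List.index?_cons_of_ne _ (show (false : Bool) ≠ true by simp)]
        cases PySem.List.index? (wellMask A v0 (h + 1)) true with
        | none => simp
        | some d =>
          dsimp only [Option.map_some, List.drop_succ_cons]
          cases PySem.List.index? ((wellMask A v0 (h + 1)).drop d) false <;> (simp; try omega)
    · rw [stepA_out A v0 (m + 1) false false h hh, wellMask_nil A v0 h (by omega)]
      simp [PySem.List.index?]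

-- ===== VERDICT (by name: the statement is the Claim_ definition above) =====
theorem search_natural_well_from_position_spec : Claim_equal_search_natural_well_from_position := by
  intro s A _ _
  unfold Spec_search_natural_well_from_position
  unfold search_natural_well_from_position search_natural_well_from_position_alt
  by_cases hle : (A.length : Int) ≤ s + 1
  · have h0 : ((A.length : Int) - (s + 1)).toNat = 0 := by omega
    rw [h0, stepA_out A (PySem.List.pyGetD A s 0) 0 false false (s + 1) (by omega)]
    simp [hle]
  · simp only [if_neg hle]
    rw [loop_false_eq A (PySem.List.pyGetD A s 0) ((A.length : Int) - (s + 1)).toNat (s + 1) le_rfl]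
    have hmask : (PySem.List.pyRange (s + 1) (A.length : Int) 1).map
          (fun h => decide (PySem.List.pyGetD A h 0 < PySem.List.pyGetD A s 0)) =
        wellMask A (PySem.List.pyGetD A s 0) (s + 1) := rfl
    rw [hmask]
    cases hd : PySem.List.index? (wellMask A (PySem.List.pyGetD A s 0) (s + 1)) true with
    | none => rfl
    | some d =>
      dsimp only
      rw [PySem.List.slice_from_natCast]
      cases PySem.List.index? ((wellMask A (PySem.List.pyGetD A s 0) (s + 1)).drop d) false <;> rfl
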